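-- pv_equiv track=rewrite | github.com/cameroncook0310/Advent-of-Code | Day 5/day5-1.py | create_order_map
-- ===== SOURCE A (Python) =====
-- def create_order_map(rules):
--     order_map = {}
--     for rule in rules:
--         rule = rule.strip().split("|")
--         if rule[0] in order_map.keys():
--             order_map[rule[0]].add(rule[1])
--         else:
--             order_map[rule[0]] = set([rule[1]])
--
--     return order_map
-- ===== SOURCE B (Python) =====
-- def create_order_map(rules):
--     pairs = [(p[0], p[1]) for p in (r.strip().split("|") for r in rules)]
--     keys = list(dict.fromkeys(f for f, _ in pairs))
--     return {k: {s for f, s in pairs if f == k} for k in keys}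
-- ===== Notes on version B (the rewrite author's own statement) =====
-- stated objective: alternative
-- what changed: A's single pass that probes the dict and mutates a per-key set is replaced by: parse every rule once into a (first, second) pair, list the distinct first elements with dict.fromkeys, then build each key's set by one filtering pass over the parsed pairs.
-- outside the precondition, e.g. on create_order_map(['12']): A raises IndexError, B raises IndexError
import Mathlib
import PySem

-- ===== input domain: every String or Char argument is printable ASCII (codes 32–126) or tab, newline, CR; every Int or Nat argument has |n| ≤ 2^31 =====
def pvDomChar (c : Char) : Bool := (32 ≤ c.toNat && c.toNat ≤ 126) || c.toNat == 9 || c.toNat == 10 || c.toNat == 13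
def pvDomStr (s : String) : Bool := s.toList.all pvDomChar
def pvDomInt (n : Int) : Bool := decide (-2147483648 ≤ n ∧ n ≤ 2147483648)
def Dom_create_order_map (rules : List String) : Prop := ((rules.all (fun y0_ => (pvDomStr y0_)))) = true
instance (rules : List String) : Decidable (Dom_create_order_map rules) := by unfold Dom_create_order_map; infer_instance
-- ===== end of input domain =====

-- B replaces A's probe-then-insert dict loop by: parse all pairs once, dedup the keys, then one
-- grouping pass per key (objective: alternative decomposition; not claimed faster).

-- ===== PORT A =====
-- literal port of A's loop: dict with set values, probe keys() then add / insert
def create_order_map (rules : List String) : List (String × List String) :=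
  (rules.foldl (fun om rule =>
      -- rule.strip().split("|"); split? is some since the separator "|" is non-empty
      let r := (PySem.Str.split? (PySem.Str.strip rule) "|").getD []
      let k := (PySem.List.pyGet? r 0).getD ""     -- rule[0]; split never returns [] so always some
      match PySem.List.pyGet? r 1 with
      | none => om          -- Python raises IndexError here; excluded by Pre_create_order_map
      | some v =>
        if (PySem.Dict.keys om).contains k then
          PySem.Dict.modify om k [] (fun s => PySem.Set.add s v)
        else
          PySem.Dict.insert om k (PySem.Set.ofList [v]))
    (PySem.Dict.empty)).items

-- ===== PORT B =====
-- literal port of Source B: parse once, dict.fromkeys dedup, per-key set comprehension over pairs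
def create_order_map_alt (rules : List String) : List (String × List String) :=
  let pairs := rules.map (fun r =>
    let p := (PySem.Str.split? (PySem.Str.strip r) "|").getD []
    ((PySem.List.pyGet? p 0).getD "", (PySem.List.pyGet? p 1).getD ""))  -- p[1]: IndexError excluded by Pre_
  let keys := PySem.List.dedup (pairs.map (·.1))                          -- dict.fromkeys
  keys.map (fun k => (k, PySem.Set.ofList ((pairs.filter (fun q => q.1 == k)).map (·.2))))

-- ===== PRECONDITION & SPEC =====
-- Pre_ excludes exactly the inputs where A raises: a rule whose stripped text splits on "|" into
-- fewer than 2 pieces (no '|' present) makes rule[1] an IndexError in A (and in B).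
def Pre_create_order_map (rules : List String) : Prop :=
  (rules.all (fun r => 2 ≤ ((PySem.Str.split? (PySem.Str.strip r) "|").getD []).length)) = true
instance (rules : List String) : Decidable (Pre_create_order_map rules) := by
  unfold Pre_create_order_map; infer_instance
def pvWitness_create_order_map : List String := [" 1|2 ", "3|4", "1|5", "1|2"]

def Spec_create_order_map (rules : List String) (out : List (String × List String)) : Prop := out = create_order_map_alt rules
instance (rules : List String) (out : List (String × List String)) : Decidable (Spec_create_order_map rules out) := by unfold Spec_create_order_map; infer_instance

-- ===== CLAIM (what is proved, stated in full; the proofs are below) =====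
def Claim_equal_create_order_map : Prop := ∀ (rules : List String), Dom_create_order_map rules → Pre_create_order_map rules → Spec_create_order_map rules (create_order_map rules)

-- ===== LEMMAS AND PROOFS =====

-- the (first, second) pair parsed from one rule string (the shared parsing of both ports)
def pvParse (r : String) : String × String :=
  let p := (PySem.Str.split? (PySem.Str.strip r) "|").getD []
  ((PySem.List.pyGet? p 0).getD "", (PySem.List.pyGet? p 1).getD "")

-- under Pre_, A's loop body is a `modify` keyed by the parsed pair
lemma stepA_eq_modify (om : PySem.Dict String (List String)) (rule : String)
    (h : 2 ≤ ((PySem.Str.split? (PySem.Str.strip rule) "|").getD []).length) :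
    (let r := (PySem.Str.split? (PySem.Str.strip rule) "|").getD []
     let k := (PySem.List.pyGet? r 0).getD ""
     match PySem.List.pyGet? r 1 with
     | none => om
     | some v =>
       if (PySem.Dict.keys om).contains k then
         PySem.Dict.modify om k [] (fun s => PySem.Set.add s v)
       else
         PySem.Dict.insert om k (PySem.Set.ofList [v]))
    = PySem.Dict.modify om (pvParse rule).1 [] (fun s => PySem.Set.add s (pvParse rule).2) := by
  rcases hr : (PySem.Str.split? (PySem.Str.strip rule) "|").getD [] with _ | ⟨a, _ | ⟨b, t⟩⟩ <;>
    simp only [hr] at h ⊢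
  · simp at h
  · simp at h
  · -- the split is a :: b :: t : rule[0] = a, rule[1] = b
    have h0 : PySem.List.pyGet? (a :: b :: t) (0 : Int) = some a := by
      simp [PySem.List.pyGet?, PySem.List.pyIdx?,
        show (0 : Int) ≤ (t.length : Int) + 1 from by positivity]
    have h1 : PySem.List.pyGet? (a :: b :: t) (1 : Int) = some b := by
      simp [PySem.List.pyGet?, PySem.List.pyIdx?]
    rw [h0, h1]
    simp only [pvParse, hr, h0, h1, Option.getD_some]
    have hck : (PySem.Dict.keys om).contains a = PySem.Dict.contains om a := by
      simp [PySem.Dict.contains_eq_decide_mem_keys]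
    rw [hck]
    by_cases hc : PySem.Dict.contains om a = true
    · rw [if_pos hc]
    · rw [if_neg hc]
      rw [PySem.Dict.modify, PySem.Dict.getD_of_not_contains om []
            (Bool.not_eq_true _ ▸ hc)]
      rfl

lemma getD_foldl_modify_add (l : List (String × String)) (d : PySem.Dict String (List String)) (c : String) :
    (l.foldl (fun d p => PySem.Dict.modify d p.1 [] (fun s => PySem.Set.add s p.2)) d).getD c []
      = PySem.Set.update (d.getD c []) ((l.filter (fun p => p.1 == c)).map (·.2)) := by
  induction l generalizing d with
  | nil => simp [PySem.Set.update]
  | cons p t ih =>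
    simp only [List.foldl_cons, ih, List.filter_cons]
    by_cases hc : p.1 = c
    · simp [hc, PySem.Set.update]
    · simp [PySem.Dict.getD_modify, (Ne.symm hc : c ≠ p.1),
        (by simp [beq_eq_decide, hc] : (p.1 == c) = false)]

-- ===== VERDICT (by name: the statement is the Claim_ definition above) =====
theorem create_order_map_spec : Claim_equal_create_order_map := by
  intro rules _ hpre
  unfold Spec_create_order_map create_order_map
  simp only [Pre_create_order_map, List.all_eq_true, decide_eq_true_eq] at hpre
  rw [PySem.List.foldl_congr_mem rules _
        (fun om rule => PySem.Dict.modify om (pvParse rule).1 [] (fun s => PySem.Set.add s (pvParse rule).2))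
        PySem.Dict.empty
        (fun om rule hrule => stepA_eq_modify om rule (hpre rule hrule))]
  rw [← List.foldl_map (f := pvParse)
        (g := fun d (p : String × String) => PySem.Dict.modify d p.1 [] (fun s => PySem.Set.add s p.2))]
  have hB : create_order_map_alt rules
      = (PySem.Set.ofList ((rules.map pvParse).map (·.1))).map
          (fun k => (k, PySem.Set.ofList (((rules.map pvParse).filter (fun q => q.1 == k)).map (·.2)))) := rfl
  rw [hB]
  set l := rules.map pvParse with hl
  have hkeys : ((l.foldl (fun om p => PySem.Dict.modify om p.1 [] (fun s => PySem.Set.add s p.2)) PySem.Dict.empty).keys)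
      = PySem.Set.ofList (l.map (·.1)) := by
    rw [PySem.Dict.keys_foldl_modify_key l (·.1) [] (fun _ p s => PySem.Set.add s p.2)]
    simp [PySem.Set.update_nil_left]
  have hnd : ((l.foldl (fun om p => PySem.Dict.modify om p.1 [] (fun s => PySem.Set.add s p.2)) PySem.Dict.empty).keys).Nodup := by
    rw [hkeys]; exact PySem.Set.nodup_ofList _
  rw [PySem.Dict.items_eq_map_keys _ hnd [], hkeys]
  apply List.map_congr_left
  intro k hk
  rw [getD_foldl_modify_add]
  simp [PySem.Set.update_nil_left]
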